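-- pv_equiv track=rewrite | github.com/kpanko/my_git_project | add_step_pyramid.py | makePyramid
-- ===== SOURCE A (Python) =====
-- def makePyramid( initialSize, stepHeight, stepWidth, numberSteps ):
--
--     vertList = []
--     faceList = []
--
--     curSize = initialSize # how large each step will be overall
--
--     # b = buttom, t = top, f = front, b = back, l = left, r = right
--     x = y = z = 0
--     voffset = 0 # refers relative vert indices to help make faces fo each step
--     sn = 0 # step number
--
--     while sn < numberSteps:
--
--         bfl = [x,y,z]
--         bfr = [x+curSize, y, z]
--         bbl = [x,y+curSize,z]
--         bbr = [x+curSize, y+curSize, z]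
--
--         tfl  = [x,y,z-stepHeight]
--         tfr = [x+curSize, y, z-stepHeight]
--         tbl = [x,y+curSize,z-stepHeight]
--         tbr = [x+curSize, y+curSize, z-stepHeight]
--
--         # add to the vert buffer
--         vertList.extend( bfl )
--         vertList.extend( bfr )
--         vertList.extend( bbl )
--         vertList.extend( bbr )
--         vertList.extend( tfl )
--         vertList.extend( tfr)
--         vertList.extend( tbl )
--         vertList.extend( tbr )
--
--         # side faces
--         faceList.extend( [ voffset+0, voffset+1, voffset+5, voffset+4 ] )# front
--         faceList.extend( [ voffset+2, voffset+3, voffset+7, voffset+6 ] )# back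
--         faceList.extend( [ voffset+0, voffset+4, voffset+6, voffset+2 ] )# left
--         faceList.extend( [ voffset+1, voffset+5, voffset+7, voffset+3 ] )# right
--
--         # connecting faces ( note: not applicable for the first iteration ).
--         if voffset > 0:
--           faceList.extend(  [voffset+0, voffset+1, voffset-3, voffset-4]) # front
--           faceList.extend(  [voffset+2, voffset+3, voffset-1, voffset-2] ) # back
--           faceList.extend(  [voffset+0, voffset+2, voffset-2, voffset-4] ) # left
--           faceList.extend(  [voffset+1, voffset+3, voffset-1, voffset-3] ) # right
--
--
--
--         # set up parameters for the next iteration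
--         curSize = curSize - ( stepWidth * 2 )
--         x = x + stepWidth
--         y = y + stepWidth
--         z = z - stepHeight
--         sn = sn + 1
--         voffset = voffset + 8
--
--
--     # cap the top.
--     voffset = voffset - 8 # corrects for the unnecessary voffset change done final iteration
--     faceList.extend( [voffset+4, voffset+5, voffset+7, voffset+6] )
--
--     # cap the bottom.
--     faceList.extend( [ 0, 1, 3, 2] )
--     return vertList, faceList
-- ===== SOURCE B (Python) =====
-- SIDE = (0, 1, 5, 4, 2, 3, 7, 6, 0, 4, 6, 2, 1, 5, 7, 3)
-- CONN = (0, 1, -3, -4, 2, 3, -1, -2, 0, 2, -2, -4, 1, 3, -1, -3)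
--
--
-- def _coord(s0, h, w, i, c, axis):
--     # vertex coordinate of corner c (bit0=+x, bit1=+y, bit2=top) of step i
--     if axis == 2:
--         return -(i + c // 4) * h
--     d = (c // (1 if axis == 0 else 2)) % 2
--     return i * w + (s0 - 2 * i * w) * d
--
--
-- def makePyramid(initialSize, stepHeight, stepWidth, numberSteps):
--     n = max(numberSteps, 0)
--     vertList = [_coord(initialSize, stepHeight, stepWidth, i, c, axis)
--                 for i in range(n) for c in range(8) for axis in range(3)]
--     faceList = [8 * i + d for i in range(n)
--                 for d in (SIDE if i == 0 else SIDE + CONN)]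
--     top = 8 * n - 8
--     return vertList, faceList + [top + 4, top + 5, top + 7, top + 6, 0, 1, 3, 2]
-- ===== Notes on version B (the rewrite author's own statement) =====
-- stated objective: alternative
-- what changed: B is table/index-driven: instead of A's stateful while-loop appending hand-written 8-vertex and 4-face blocks, B computes every vertex coordinate by one closed-form function of (step i, corner bit-code c, axis) in a flat triple comprehension, and emits faces by mapping fixed offset tables SIDE/CONN over 8*i, appending the caps from 8*n-8.
import Mathlib
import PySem

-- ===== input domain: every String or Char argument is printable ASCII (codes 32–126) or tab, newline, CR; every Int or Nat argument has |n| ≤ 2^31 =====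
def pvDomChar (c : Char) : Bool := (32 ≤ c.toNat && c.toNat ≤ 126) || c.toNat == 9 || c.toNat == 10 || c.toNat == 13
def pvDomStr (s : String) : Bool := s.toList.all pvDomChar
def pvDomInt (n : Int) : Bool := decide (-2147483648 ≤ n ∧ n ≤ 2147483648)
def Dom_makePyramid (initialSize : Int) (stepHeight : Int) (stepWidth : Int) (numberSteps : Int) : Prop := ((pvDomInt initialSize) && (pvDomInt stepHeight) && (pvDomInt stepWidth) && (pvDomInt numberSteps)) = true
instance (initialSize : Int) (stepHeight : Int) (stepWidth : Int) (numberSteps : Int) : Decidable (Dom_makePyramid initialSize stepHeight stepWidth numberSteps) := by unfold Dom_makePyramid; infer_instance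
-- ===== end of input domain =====

-- B is table/index-driven: a flat comprehension computing each vertex coordinate in closed
-- form from (step, corner code, axis) and faces mapped from fixed offset tables
-- (objective: alternative; return-value equivalence).

-- ===== PORT A =====
-- A's while loop: fuel = number of remaining iterations (the loop runs numberSteps.toNat
-- times). State carried exactly as in A; returns (vertList, faceList, voffset).
def pyrLoop (stepHeight stepWidth : Int) :
    Nat → Int → Int → Int → Int → Int → List Int → List Int → List Int × List Int × Int
  | 0, _, _, _, _, voffset, vertList, faceList => (vertList, faceList, voffset)
  | Nat.succ k, x, y, z, curSize, voffset, vertList, faceList =>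
    let vertList := vertList ++ [x, y, z] ++ [x + curSize, y, z] ++ [x, y + curSize, z]
      ++ [x + curSize, y + curSize, z]
      ++ [x, y, z - stepHeight] ++ [x + curSize, y, z - stepHeight]
      ++ [x, y + curSize, z - stepHeight] ++ [x + curSize, y + curSize, z - stepHeight]
    let faceList := faceList ++ [voffset + 0, voffset + 1, voffset + 5, voffset + 4]
      ++ [voffset + 2, voffset + 3, voffset + 7, voffset + 6]
      ++ [voffset + 0, voffset + 4, voffset + 6, voffset + 2]
      ++ [voffset + 1, voffset + 5, voffset + 7, voffset + 3]
    let faceList := if voffset > 0 then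
        faceList ++ [voffset + 0, voffset + 1, voffset - 3, voffset - 4]
          ++ [voffset + 2, voffset + 3, voffset - 1, voffset - 2]
          ++ [voffset + 0, voffset + 2, voffset - 2, voffset - 4]
          ++ [voffset + 1, voffset + 3, voffset - 1, voffset - 3]
      else faceList
    pyrLoop stepHeight stepWidth k (x + stepWidth) (y + stepWidth) (z - stepHeight)
      (curSize - stepWidth * 2) (voffset + 8) vertList faceList

def makePyramid (initialSize : Int) (stepHeight : Int) (stepWidth : Int) (numberSteps : Int) : List Int × List Int :=
  let r := pyrLoop stepHeight stepWidth numberSteps.toNat 0 0 0 initialSize 0 [] []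
  let vertList := r.1
  let voffset := r.2.2 - 8
  let faceList := r.2.1 ++ [voffset + 4, voffset + 5, voffset + 7, voffset + 6] ++ [0, 1, 3, 2]
  (vertList, faceList)

-- ===== PORT B =====
def sideTbl : List Int := [0, 1, 5, 4, 2, 3, 7, 6, 0, 4, 6, 2, 1, 5, 7, 3]
def connTbl : List Int := [0, 1, -3, -4, 2, 3, -1, -2, 0, 2, -2, -4, 1, 3, -1, -3]

-- Source B's _coord: closed-form coordinate of corner c (bit0=+x, bit1=+y, bit2=top) of step i
def coordB (s0 h w i c axis : Int) : Int :=
  if axis == 2 then -(i + PySem.Int.floordiv c 4) * h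
  else
    let d := PySem.Int.mod (PySem.Int.floordiv c (if axis == 0 then 1 else 2)) 2
    i * w + (s0 - 2 * i * w) * d

def makePyramid_alt (initialSize : Int) (stepHeight : Int) (stepWidth : Int) (numberSteps : Int) : List Int × List Int :=
  let n := max numberSteps 0
  let vertList := (PySem.List.pyRange 0 n 1).flatMap (fun i =>
    (PySem.List.pyRange 0 8 1).flatMap (fun c =>
      (PySem.List.pyRange 0 3 1).map (fun axis =>
        coordB initialSize stepHeight stepWidth i c axis)))
  let faceList := (PySem.List.pyRange 0 n 1).flatMap (fun i =>
    (if i == 0 then sideTbl else sideTbl ++ connTbl).map (fun d => 8 * i + d))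
  let top := 8 * n - 8
  (vertList, faceList ++ [top + 4, top + 5, top + 7, top + 6, 0, 1, 3, 2])

-- ===== PRECONDITION & SPEC =====
def Spec_makePyramid (initialSize : Int) (stepHeight : Int) (stepWidth : Int) (numberSteps : Int) (out : List Int × List Int) : Prop := out = makePyramid_alt initialSize stepHeight stepWidth numberSteps
instance (initialSize : Int) (stepHeight : Int) (stepWidth : Int) (numberSteps : Int) (out : List Int × List Int) : Decidable (Spec_makePyramid initialSize stepHeight stepWidth numberSteps out) := by unfold Spec_makePyramid; infer_instance

-- ===== CLAIM (what is proved, stated in full; the proofs are below) =====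
def Claim_equal_makePyramid : Prop := ∀ (initialSize : Int) (stepHeight : Int) (stepWidth : Int) (numberSteps : Int), Dom_makePyramid initialSize stepHeight stepWidth numberSteps → Spec_makePyramid initialSize stepHeight stepWidth numberSteps (makePyramid initialSize stepHeight stepWidth numberSteps)

-- ===== LEMMAS AND PROOFS =====

-- the per-step vertex block of B, evaluated in closed form
theorem vertBlock_eval (s0 h w j : Int) :
    (PySem.List.pyRange 0 8 1).flatMap (fun c =>
      (PySem.List.pyRange 0 3 1).map (fun axis => coordB s0 h w j c axis))
    = [j * w, j * w, -j * h,
       j * w + (s0 - 2 * j * w), j * w, -j * h,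
       j * w, j * w + (s0 - 2 * j * w), -j * h,
       j * w + (s0 - 2 * j * w), j * w + (s0 - 2 * j * w), -j * h,
       j * w, j * w, -j * h - h,
       j * w + (s0 - 2 * j * w), j * w, -j * h - h,
       j * w, j * w + (s0 - 2 * j * w), -j * h - h,
       j * w + (s0 - 2 * j * w), j * w + (s0 - 2 * j * w), -j * h - h] := by
  have h8 : PySem.List.pyRange 0 8 1 = [0, 1, 2, 3, 4, 5, 6, 7] := by decide
  have h3 : PySem.List.pyRange 0 3 1 = [0, 1, 2] := by decide
  simp only [h8, h3, List.flatMap_cons, List.flatMap_nil, List.map_cons, List.map_nil,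
    List.append_nil, coordB]
  norm_num [PySem.Int.floordiv, PySem.Int.mod,
    show Int.fdiv 1 2 = 0 from by decide, show Int.fdiv 1 4 = 0 from by decide,
    show Int.fdiv 2 4 = 0 from by decide, show Int.fdiv 3 2 = 1 from by decide,
    show Int.fdiv 3 4 = 0 from by decide, show Int.fdiv 4 2 = 2 from by decide,
    show Int.fdiv 4 4 = 1 from by decide, show Int.fdiv 5 2 = 2 from by decide,
    show Int.fdiv 5 4 = 1 from by decide, show Int.fdiv 6 2 = 3 from by decide,
    show Int.fdiv 6 4 = 1 from by decide, show Int.fdiv 7 2 = 3 from by decide,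
    show Int.fdiv 7 4 = 1 from by decide, show Int.fmod 1 2 = 1 from by decide,
    show Int.fmod 2 2 = 0 from by decide, show Int.fmod 3 2 = 1 from by decide,
    show Int.fmod 0 2 = 0 from by decide, show Int.fmod 4 2 = 0 from by decide,
    show Int.fmod 5 2 = 1 from by decide, show Int.fmod 6 2 = 0 from by decide,
    show Int.fmod 7 2 = 1 from by decide]
  ring


-- A's loop state after j iterations is the closed form B uses; running k more iterations
-- appends exactly B's flatMap over the index range [j, j+k).
theorem pyrLoop_eq (initialSize stepHeight stepWidth : Int) :
    ∀ (k : Nat) (j x y z c v : Int) (vl fl : List Int),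
      x = j * stepWidth → y = j * stepWidth → z = -j * stepHeight →
      c = initialSize - 2 * j * stepWidth → v = 8 * j → 0 ≤ j →
      pyrLoop stepHeight stepWidth k x y z c v vl fl
      = (vl ++ (PySem.List.pyRange j (j + k) 1).flatMap (fun i =>
           (PySem.List.pyRange 0 8 1).flatMap (fun c' =>
             (PySem.List.pyRange 0 3 1).map (fun axis =>
               coordB initialSize stepHeight stepWidth i c' axis))),
         fl ++ (PySem.List.pyRange j (j + k) 1).flatMap (fun i =>
           (if i == 0 then sideTbl else sideTbl ++ connTbl).map (fun d => 8 * i + d)),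
         8 * (j + k)) := by
  intro k
  induction k with
  | zero =>
    intro j x y z c v vl fl hx hy hz hc hv hj
    subst hx hy hz hc hv
    simp only [Nat.cast_zero, add_zero]
    rw [PySem.List.pyRange_one_eq_nil le_rfl]
    simp [pyrLoop]
  | succ k ih =>
    intro j x y z c v vl fl hx hy hz hc hv hj
    subst hx hy hz hc hv
    have hcast : j + ((k + 1 : Nat) : Int) = j + 1 + (k : Nat) := by push_cast; ring
    rw [hcast, PySem.List.pyRange_one_cons (by omega : j < j + 1 + (k : Nat))]
    simp only [List.flatMap_cons]
    rw [pyrLoop]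
    rw [ih (j + 1) _ _ _ _ _ _ _ (by ring) (by ring) (by ring) (by ring) (by ring) (by omega)]
    rw [vertBlock_eval initialSize stepHeight stepWidth j]
    have hF : (if (8 * j : Int) > 0 then
          fl ++ [8 * j + 0, 8 * j + 1, 8 * j + 5, 8 * j + 4]
            ++ [8 * j + 2, 8 * j + 3, 8 * j + 7, 8 * j + 6]
            ++ [8 * j + 0, 8 * j + 4, 8 * j + 6, 8 * j + 2]
            ++ [8 * j + 1, 8 * j + 5, 8 * j + 7, 8 * j + 3]
            ++ [8 * j + 0, 8 * j + 1, 8 * j - 3, 8 * j - 4]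
            ++ [8 * j + 2, 8 * j + 3, 8 * j - 1, 8 * j - 2]
            ++ [8 * j + 0, 8 * j + 2, 8 * j - 2, 8 * j - 4]
            ++ [8 * j + 1, 8 * j + 3, 8 * j - 1, 8 * j - 3]
        else fl ++ [8 * j + 0, 8 * j + 1, 8 * j + 5, 8 * j + 4]
            ++ [8 * j + 2, 8 * j + 3, 8 * j + 7, 8 * j + 6]
            ++ [8 * j + 0, 8 * j + 4, 8 * j + 6, 8 * j + 2]
            ++ [8 * j + 1, 8 * j + 5, 8 * j + 7, 8 * j + 3])
        = fl ++ (if j == 0 then sideTbl else sideTbl ++ connTbl).map (fun d => 8 * j + d) := by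
      by_cases h : j = 0
      · subst h; simp [sideTbl]
      · have : (0 : Int) < 8 * j := by omega
        simp only [sideTbl, connTbl, h, this, if_pos, beq_iff_eq, if_false,
          List.map_cons, List.map_nil, List.map_append]
        simp
        try omega
    simp only [hF, Prod.mk.injEq]
    refine ⟨?_, ?_, ?_⟩
    · simp [List.append_assoc]
    · simp [List.append_assoc]
    · push_cast
      try ring

-- ===== VERDICT (by name: the statement is the Claim_ definition above) =====
theorem makePyramid_spec : Claim_equal_makePyramid := by
  intro initialSize stepHeight stepWidth numberSteps _
  unfold Spec_makePyramid makePyramid makePyramid_alt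
  have h0 := pyrLoop_eq initialSize stepHeight stepWidth numberSteps.toNat 0 0 0 0
    initialSize 0 [] [] (by ring) (by ring) (by ring) (by ring) (by ring) (by omega)
  simp only [zero_add] at h0
  rw [h0]
  have hmax : (max numberSteps 0 : Int) = (numberSteps.toNat : Int) := by omega
  simp only [hmax, Prod.mk.injEq]
  refine ⟨by simp, ?_⟩
  simp only [List.append_assoc, List.cons_append, List.nil_append]
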